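-- pv_equiv track=rewrite | github.com/Orodef/Python | contarEspacios.py | contarEspacios
-- ===== SOURCE A (Python) =====
-- def contarEspacios(oracion):
--
--     iteracion = 0
--     cantidadPalabras = 0
--     letraActual = ''
--
--     while oracion != '':
--         iteracion += 1
--
--         letraActual = oracion[:1]
--         if letraActual == ' ':
--             cantidadPalabras += 1
--             if iteracion == 1:
--                 cantidadPalabras -= 1
--             iteracion = 0
--         oracion = oracion [1:]
--     return cantidadPalabras + 1
-- ===== SOURCE B (Python) =====
-- def contarEspacios(oracion):
--     prev = ' '
--     cuenta = 0
--     for ch in oracion: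
--         if ch == ' ' and prev != ' ':
--             cuenta += 1
--         prev = ch
--     return cuenta + 1
-- ===== Notes on version B (the rewrite author's own statement) =====
-- stated objective: faster
-- what changed: Replaced the repeated string slicing (oracion[:1]/oracion[1:] each round, O(n^2) total) and the iteracion counter-with-correction by a single linear scan over the characters tracking the previous character, counting spaces preceded by a non-space.
import Mathlib
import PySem

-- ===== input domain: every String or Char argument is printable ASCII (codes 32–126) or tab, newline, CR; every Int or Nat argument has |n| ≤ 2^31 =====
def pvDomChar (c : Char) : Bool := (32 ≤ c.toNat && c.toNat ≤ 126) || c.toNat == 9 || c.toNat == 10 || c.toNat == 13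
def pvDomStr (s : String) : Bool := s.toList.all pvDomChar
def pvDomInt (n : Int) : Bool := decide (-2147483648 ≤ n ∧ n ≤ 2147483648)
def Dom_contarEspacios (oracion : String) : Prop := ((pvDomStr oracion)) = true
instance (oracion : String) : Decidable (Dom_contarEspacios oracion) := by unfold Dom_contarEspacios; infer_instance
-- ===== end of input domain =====

-- B replaces A's repeated slicing (O(n^2)) by one linear scan tracking the previous character.

-- ===== PORT A =====
-- A's while loop: state (iteracion, cantidadPalabras), consuming the string one char at a time.
def contarEspaciosLoopA : List Char → Int → Int → Int
  | [], _, cantidadPalabras => cantidadPalabras + 1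
  | letraActual :: rest, iteracion, cantidadPalabras =>
    let iteracion := iteracion + 1
    if letraActual = ' ' then
      let cantidadPalabras := cantidadPalabras + 1
      let cantidadPalabras := if iteracion = 1 then cantidadPalabras - 1 else cantidadPalabras
      contarEspaciosLoopA rest 0 cantidadPalabras
    else
      contarEspaciosLoopA rest iteracion cantidadPalabras

def contarEspacios (oracion : String) : Int :=
  contarEspaciosLoopA oracion.toList 0 0

-- ===== PORT B =====
-- B's for loop: state (prev, cuenta).
def contarEspaciosLoopB : List Char → Char → Int → Int
  | [], _, cuenta => cuenta
  | ch :: rest, prev, cuenta =>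
    contarEspaciosLoopB rest ch (if ch = ' ' ∧ prev ≠ ' ' then cuenta + 1 else cuenta)

def contarEspacios_alt (oracion : String) : Int :=
  contarEspaciosLoopB oracion.toList ' ' 0 + 1

-- ===== PRECONDITION & SPEC =====
def Spec_contarEspacios (oracion : String) (out : Int) : Prop := out = contarEspacios_alt oracion
instance (oracion : String) (out : Int) : Decidable (Spec_contarEspacios oracion out) := by unfold Spec_contarEspacios; infer_instance

-- ===== CLAIM (what is proved, stated in full; the proofs are below) =====
def Claim_equal_contarEspacios : Prop := ∀ (oracion : String), Dom_contarEspacios oracion → Spec_contarEspacios oracion (contarEspacios oracion)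

-- ===== LEMMAS AND PROOFS =====
-- Invariant linking the two loop states: iteracion = 0 exactly when prev is a space.
theorem contarEspacios_loop_eq (l : List Char) (iteracion cant : Int) (prev : Char)
    (hnn : 0 ≤ iteracion) (h : iteracion = 0 ↔ prev = ' ') :
    contarEspaciosLoopA l iteracion cant = contarEspaciosLoopB l prev cant + 1 := by
  induction l generalizing iteracion cant prev with
  | nil => rfl
  | cons c rest ih =>
    simp only [contarEspaciosLoopA, contarEspaciosLoopB]
    by_cases hc : c = ' '
    · by_cases hz : iteracion = 0
      · have hp : prev = ' ' := h.mp hz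
        have h1 : iteracion + 1 = 1 := by omega
        rw [if_pos hc, if_pos h1, if_neg (fun hq => hq.2 hp)]
        have hcc : cant + 1 - 1 = cant := by ring
        rw [hcc]
        rw [hc]
        exact ih 0 cant ' ' le_rfl (by simp)
      · have hp : prev ≠ ' ' := fun hp => hz (h.mpr hp)
        have h1 : ¬ iteracion + 1 = 1 := by omega
        rw [if_pos hc, if_neg h1, if_pos ⟨hc, hp⟩]
        rw [hc]
        exact ih 0 (cant + 1) ' ' le_rfl (by simp)
    · have h1 : iteracion + 1 ≠ 0 := by omega
      rw [if_neg hc, if_neg (fun hq : c = ' ' ∧ prev ≠ ' ' => hc hq.1)]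
      exact ih (iteracion + 1) cant c (by omega)
        ⟨fun hx => absurd hx h1, fun hx => absurd hx hc⟩

-- ===== VERDICT (by name: the statement is the Claim_ definition above) =====
theorem contarEspacios_spec : Claim_equal_contarEspacios := by
  intro oracion _
  unfold Spec_contarEspacios contarEspacios contarEspacios_alt
  exact contarEspacios_loop_eq _ 0 0 ' ' le_rfl (by simp)
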